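-- pv_equiv track=rewrite | github.com/casey451/havasu-chat | app/chat/normalizer.py | _strip_edge_punct_ws
-- ===== SOURCE A (Python) =====
-- import string
--
-- _EDGE_CHARS = frozenset(string.punctuation + string.whitespace)
--
-- def _strip_edge_punct_ws(text: str) -> str:
--     if not text:
--         return text
--     lo, hi = 0, len(text)
--     while lo < hi and text[lo] in _EDGE_CHARS:
--         lo += 1
--     while hi > lo and text[hi - 1] in _EDGE_CHARS:
--         hi -= 1
--     return text[lo:hi]
-- ===== SOURCE B (Python) =====
-- import string
--
-- _EDGE_CHARS = frozenset(string.punctuation + string.whitespace)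
--
--
-- def _strip_edge_punct_ws(text: str) -> str:
--     if not text:
--         return text
--     # Single forward pass with an accumulator: edge chars before the first kept
--     # char are skipped; edge chars after it are buffered and only flushed when a
--     # later non-edge char proves they are interior, so a trailing run is dropped.
--     out, pending = [], []
--     for ch in text:
--         if ch in _EDGE_CHARS:
--             if out:
--                 pending.append(ch)
--         else:
--             out.extend(pending)
--             pending = []
--             out.append(ch)
--     return ''.join(out)
-- ===== Notes on version B (the rewrite author's own statement) =====
-- stated objective: alternative
-- what changed: Replaces A's two inward boundary scans (one from each end over the fixed string) with a single forward pass that keeps an output accumulator plus a pending buffer of edge characters, flushed only when a later non-edge character shows they are interior.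
import Mathlib
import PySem

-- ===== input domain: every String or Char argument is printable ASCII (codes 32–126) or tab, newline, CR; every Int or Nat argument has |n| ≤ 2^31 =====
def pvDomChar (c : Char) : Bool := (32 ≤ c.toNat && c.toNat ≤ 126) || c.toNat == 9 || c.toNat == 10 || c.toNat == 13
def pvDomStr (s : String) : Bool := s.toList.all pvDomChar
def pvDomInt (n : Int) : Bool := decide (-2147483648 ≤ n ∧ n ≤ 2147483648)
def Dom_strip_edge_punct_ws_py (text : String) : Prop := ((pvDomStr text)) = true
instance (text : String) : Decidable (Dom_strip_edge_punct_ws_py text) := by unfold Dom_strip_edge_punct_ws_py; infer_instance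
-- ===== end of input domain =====

-- B replaces A's two inward pointer scans with a single forward pass holding an
-- output accumulator and a pending buffer for possibly-trailing edge characters (alternative decomposition).

-- ===== PORT A =====
-- string.punctuation and string.whitespace (module constants)
def pvPunctuation : String := "!\"#$%&'()*+,-./:;<=>?@[\\]^_`{|}~"
def pvWhitespace : String := " \t\n\x0B\x0C\r"
-- _EDGE_CHARS = frozenset(string.punctuation + string.whitespace)
def pvEdgeChars : PySem.Set Char := PySem.Set.ofList (pvPunctuation ++ pvWhitespace).toList
-- 'c in _EDGE_CHARS'
def pvEdge (c : Char) : Bool := decide (c ∈ pvEdgeChars)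

-- 'while lo < hi and text[lo] in _EDGE_CHARS: lo += 1'
def pvLoLoop (cs : List Char) (hi lo : Nat) : Nat :=
  if h : lo < hi ∧ (PySem.List.pyGet? cs (lo : Int)).any pvEdge then
    pvLoLoop cs hi (lo + 1)
  else lo
termination_by hi - lo
decreasing_by omega

-- 'while hi > lo and text[hi - 1] in _EDGE_CHARS: hi -= 1'
def pvHiLoop (cs : List Char) (lo hi : Nat) : Nat :=
  if h : lo < hi ∧ (PySem.List.pyGet? cs ((hi : Int) - 1)).any pvEdge then
    pvHiLoop cs lo (hi - 1)
  else hi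
termination_by hi
decreasing_by omega

def strip_edge_punct_ws_py (text : String) : String :=
  if text = "" then text
  else
    let cs := text.toList
    let lo := pvLoLoop cs cs.length 0
    let hi := pvHiLoop cs lo cs.length
    String.ofList (PySem.List.slice cs (some (lo : Int)) (some (hi : Int)))

-- ===== PORT B =====
-- loop body of Source B: state is (out, pending)
def pvStep (st : List Char × List Char) (ch : Char) : List Char × List Char :=
  if pvEdge ch then
    if st.1.isEmpty then st else (st.1, st.2 ++ [ch])
  else (st.1 ++ st.2 ++ [ch], [])

def strip_edge_punct_ws_py_alt (text : String) : String :=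
  if text = "" then text
  else String.ofList ((text.toList.foldl pvStep ([], [])).1)

-- ===== PRECONDITION & SPEC =====
def Spec_strip_edge_punct_ws_py (text : String) (out : String) : Prop := out = strip_edge_punct_ws_py_alt text
instance (text : String) (out : String) : Decidable (Spec_strip_edge_punct_ws_py text out) := by unfold Spec_strip_edge_punct_ws_py; infer_instance

-- ===== CLAIM (what is proved, stated in full; the proofs are below) =====
def Claim_equal_strip_edge_punct_ws_py : Prop := ∀ (text : String), Dom_strip_edge_punct_ws_py text → Spec_strip_edge_punct_ws_py text (strip_edge_punct_ws_py text)

-- ===== LEMMAS AND PROOFS =====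

-- A-side loop characterisations
theorem pvLoLoop_spec (cs : List Char) :
    ∀ (n lo : Nat), cs.length - lo = n → lo ≤ cs.length →
      lo ≤ pvLoLoop cs cs.length lo ∧ pvLoLoop cs cs.length lo ≤ cs.length ∧
      cs.drop (pvLoLoop cs cs.length lo) = (cs.drop lo).dropWhile pvEdge := by
  intro n
  induction n with
  | zero =>
    intro lo hn hle
    have hlo : lo = cs.length := by omega
    rw [pvLoLoop]
    simp [hlo]
  | succ n ih =>
    intro lo hn hle
    rw [pvLoLoop]
    split
    · rename_i h
      obtain ⟨hlt, hget⟩ := h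
      have ih' := ih (lo + 1) (by omega) (by omega)
      refine ⟨by omega, ih'.2.1, ?_⟩
      rw [ih'.2.2]
      have hdrop : cs.drop lo = cs[lo] :: cs.drop (lo + 1) := List.drop_eq_getElem_cons hlt
      have hp : pvEdge cs[lo] = true := by
        rw [PySem.List.pyGet?_natCast] at hget
        simpa [List.getElem?_eq_getElem hlt] using hget
      rw [hdrop, List.dropWhile_cons_of_pos hp]
    · rename_i h
      refine ⟨le_refl _, hle, ?_⟩
      rcases Nat.lt_or_ge lo cs.length with hlt | hge
      · have hdrop : cs.drop lo = cs[lo] :: cs.drop (lo + 1) := List.drop_eq_getElem_cons hlt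
        have hp : pvEdge cs[lo] = false := by
          by_contra hcontra
          exact h ⟨hlt, by
            rw [PySem.List.pyGet?_natCast]
            simp [List.getElem?_eq_getElem hlt]
            simpa using hcontra⟩
        rw [hdrop, List.dropWhile_cons_of_neg (by simp [hp])]
      · have : cs.drop lo = [] := List.drop_eq_nil_of_le hge
        simp only [this, List.dropWhile_nil]

theorem pvHiLoop_spec (cs : List Char) (lo : Nat) :
    ∀ (n hi : Nat), hi = n → lo ≤ hi → hi ≤ cs.length →
      lo ≤ pvHiLoop cs lo hi ∧ pvHiLoop cs lo hi ≤ hi ∧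
      (cs.take (pvHiLoop cs lo hi)).drop lo
        = ((((cs.take hi).drop lo).reverse).dropWhile pvEdge).reverse := by
  intro n
  induction n with
  | zero =>
    intro hi hn hlo hhi
    subst hn
    have hlo0 : lo = 0 := by omega
    rw [pvHiLoop]
    simp [hlo0]
  | succ n ih =>
    intro hi hn hlo hhi
    rw [pvHiLoop]
    split
    · rename_i h
      obtain ⟨hlt, hget⟩ := h
      have hidx : hi - 1 < cs.length := by omega
      have hcast : ((hi : Int) - 1) = ((hi - 1 : Nat) : Int) := by omega
      rw [hcast, PySem.List.pyGet?_natCast] at hget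
      have hp : pvEdge cs[hi - 1] = true := by
        simpa [List.getElem?_eq_getElem hidx] using hget
      have ih' := ih (hi - 1) (by omega) (by omega) (by omega)
      refine ⟨ih'.1, le_trans ih'.2.1 (by omega), ?_⟩
      rw [ih'.2.2]
      have hsplit : (cs.take hi).drop lo = (cs.take (hi - 1)).drop lo ++ [cs[hi - 1]] := by
        have h1 : cs.take hi = cs.take (hi - 1) ++ [cs[hi - 1]] := by
          conv_lhs => rw [show hi = (hi - 1) + 1 by omega]
          rw [List.take_add_one, List.getElem?_eq_getElem hidx]
          rfl
        rw [h1, List.drop_append_of_le_length]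
        simp [List.length_take]
        omega
      rw [hsplit]
      rw [List.reverse_append]
      simp only [List.reverse_cons, List.reverse_nil, List.nil_append, List.singleton_append]
      rw [List.dropWhile_cons_of_pos hp]
    · rename_i h
      refine ⟨hlo, le_refl _, ?_⟩
      rcases Nat.eq_or_lt_of_le hlo with heq | hlt
      · have hlen : ((cs.take hi).drop lo).length = 0 := by
          simp [List.length_take, List.length_drop]
          omega
        have hnil : (cs.take hi).drop lo = [] := List.eq_nil_of_length_eq_zero hlen
        rw [hnil]
        simp
      · have hidx : hi - 1 < cs.length := by omega
        have hp : pvEdge cs[hi - 1] = false := by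
          by_contra hcontra
          refine h ⟨hlt, ?_⟩
          have hcast : ((hi : Int) - 1) = ((hi - 1 : Nat) : Int) := by omega
          rw [hcast, PySem.List.pyGet?_natCast]
          simp [List.getElem?_eq_getElem hidx]
          simpa using hcontra
        have hsplit : (cs.take hi).drop lo = (cs.take (hi - 1)).drop lo ++ [cs[hi - 1]] := by
          have h1 : cs.take hi = cs.take (hi - 1) ++ [cs[hi - 1]] := by
            conv_lhs => rw [show hi = (hi - 1) + 1 by omega]
            rw [List.take_add_one, List.getElem?_eq_getElem hidx]
            rfl
          rw [h1, List.drop_append_of_le_length]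
          simp [List.length_take]
          omega
        rw [hsplit, List.reverse_append]
        simp only [List.reverse_cons, List.reverse_nil, List.nil_append, List.singleton_append]
        rw [List.dropWhile_cons_of_neg (by simp [hp])]
        simp

-- B-side lemmas
-- right-strip through a known interior (non-edge) element
theorem pvRstrip_mid (l1 l2 : List Char) (c : Char) (hc : pvEdge c = false) :
    ((l1 ++ c :: l2).reverse.dropWhile pvEdge).reverse
      = l1 ++ c :: (l2.reverse.dropWhile pvEdge).reverse := by
  have h1 : List.dropWhile pvEdge (l2.reverse ++ [c])
      = List.dropWhile pvEdge l2.reverse ++ [c] := by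
    rw [List.dropWhile_append]
    split
    · rename_i hemp
      rw [List.dropWhile_cons_of_neg (by simp [hc])]
      rw [List.isEmpty_iff] at hemp
      simp [hemp]
    · rfl
  rw [List.reverse_append, List.reverse_cons, List.dropWhile_append, h1]
  simp
-- the head of dropWhile does not satisfy the predicate
theorem pvDropWhile_head_false :
    ∀ (cs : List Char) (c : Char) (rest : List Char),
      List.dropWhile pvEdge cs = c :: rest → pvEdge c = false := by
  intro cs
  induction cs with
  | nil => intro c rest h; simp at h
  | cons a l ih =>
    intro c rest h
    by_cases ha : pvEdge a = true
    · rw [List.dropWhile_cons_of_pos ha] at h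
      exact ih c rest h
    · rw [List.dropWhile_cons_of_neg ha] at h
      cases h
      simpa using ha
-- while out is empty, leading edge characters leave the state unchanged
theorem pvFold_phase1 (cs : List Char) :
    cs.foldl pvStep ([], []) = (cs.dropWhile pvEdge).foldl pvStep ([], []) := by
  induction cs with
  | nil => rfl
  | cons c cs ih =>
    by_cases hc : pvEdge c = true
    · rw [List.dropWhile_cons_of_pos hc, List.foldl_cons]
      simpa [pvStep, hc] using ih
    · rw [List.dropWhile_cons_of_neg hc]
-- once out is nonempty, the fold appends everything except a trailing edge run
theorem pvFold_phase2 (cs : List Char) :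
    ∀ (out pend : List Char), out ≠ [] → (∀ x ∈ pend, pvEdge x = true) →
      (cs.foldl pvStep (out, pend)).1
        = out ++ ((pend ++ cs).reverse.dropWhile pvEdge).reverse := by
  induction cs with
  | nil =>
    intro out pend _ hpend
    have : pend.reverse.dropWhile pvEdge = [] := by
      rw [List.dropWhile_eq_nil_iff]
      intro x hx
      exact hpend x (List.mem_reverse.mp hx)
    simp [this]
  | cons c cs ih =>
    intro out pend hout hpend
    by_cases hc : pvEdge c = true
    · have hstep : pvStep (out, pend) c = (out, pend ++ [c]) := by
        simp [pvStep, hc, List.isEmpty_iff, hout]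
      rw [List.foldl_cons, hstep,
        ih out (pend ++ [c]) hout (by
          intro x hx
          rcases List.mem_append.mp hx with h | h
          · exact hpend x h
          · simp at h; subst h; exact hc)]
      simp
    · have hc' : pvEdge c = false := by simpa using hc
      have hstep : pvStep (out, pend) c = (out ++ pend ++ [c], []) := by
        simp [pvStep, hc']
      rw [List.foldl_cons, hstep,
        ih (out ++ pend ++ [c]) [] (by simp) (by simp)]
      rw [pvRstrip_mid pend cs c hc']
      simp
-- B's fold computes left-strip then right-strip
theorem pvFold_strip (cs : List Char) :
    (cs.foldl pvStep ([], [])).1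
      = (((cs.dropWhile pvEdge).reverse).dropWhile pvEdge).reverse := by
  rw [pvFold_phase1]
  cases hdw : cs.dropWhile pvEdge with
  | nil => simp
  | cons c rest =>
    have hc : pvEdge c = false := pvDropWhile_head_false cs c rest hdw
    have hstep : pvStep ([], []) c = ([c], []) := by simp [pvStep, hc]
    rw [List.foldl_cons, hstep, pvFold_phase2 rest [c] [] (by simp) (by simp)]
    have := pvRstrip_mid ([] : List Char) rest c hc
    simp only [List.nil_append] at this
    rw [this]
    simp

-- ===== VERDICT (by name: the statement is the Claim_ definition above) =====
theorem strip_edge_punct_ws_py_spec : Claim_equal_strip_edge_punct_ws_py := by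
  intro text _hdom
  unfold Spec_strip_edge_punct_ws_py
  by_cases hempty : text = ""
  · simp [strip_edge_punct_ws_py, strip_edge_punct_ws_py_alt, hempty]
  · simp only [strip_edge_punct_ws_py, strip_edge_punct_ws_py_alt, if_neg hempty]
    set cs := text.toList with hcs
    have hlo := pvLoLoop_spec cs (cs.length - 0) 0 rfl (Nat.zero_le _)
    set lo := pvLoLoop cs cs.length 0 with hlodef
    have hhi := pvHiLoop_spec cs lo cs.length cs.length rfl hlo.2.1 (le_refl _)
    set hi := pvHiLoop cs lo cs.length with hhidef
    have hslice : PySem.List.slice cs (some (lo : Int)) (some (hi : Int))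
        = (cs.drop lo).take (hi - lo) := PySem.List.slice_natCast cs lo hi
    have hquot : (cs.take hi).drop lo = (cs.drop lo).take (hi - lo) := by
      rw [List.drop_take]
    simp only [List.take_length, List.drop_zero] at hlo hhi
    rw [hslice, ← hquot, hhi.2.2, hlo.2.2, ← pvFold_strip]
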